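-- pv_equiv track=rewrite | github.com/seungjun-green/Google-KickStart_B | 2021/Round-H/Transform the String.py | solution
-- ===== SOURCE A (Python) =====
-- import math
--
-- def solution(S,T):
--     data = []
--     answer = 0
--     global_min = math.inf
--     curr_min = 0
--
--     for i in range(len(T)):
--         data.append(ord(T[i]))
--
--     for i in range(len(S)):
--         for k in range(len(T)):
--             curr_min = min(abs(data[k]-ord(S[i])), 26-abs(data[k]-ord(S[i])))
--
--             if curr_min < global_min:
--                 global_min = curr_min
--
--         answer += global_min
--         global_min = math.inf
--
--     return answer
-- ===== SOURCE B (Python) =====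
-- def solution(S, T):
--     tvals = set(map(ord, T))
--     best = {c: min(min(abs(t - c), 26 - abs(t - c)) for t in tvals)
--             for c in set(map(ord, S))}
--     return sum(best[c] for c in map(ord, S))
-- ===== Notes on version B (the rewrite author's own statement) =====
-- stated objective: faster
-- what changed: Instead of rescanning all of T for every character of S, B precomputes one min-cyclic-distance dictionary keyed by the distinct character codes of S (minimum taken over the distinct codes of T) and then does a single O(1)-lookup pass over S.
-- outside the precondition, e.g. on solution('a', ''): A returns inf, B raises ValueError
import Mathlib
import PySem

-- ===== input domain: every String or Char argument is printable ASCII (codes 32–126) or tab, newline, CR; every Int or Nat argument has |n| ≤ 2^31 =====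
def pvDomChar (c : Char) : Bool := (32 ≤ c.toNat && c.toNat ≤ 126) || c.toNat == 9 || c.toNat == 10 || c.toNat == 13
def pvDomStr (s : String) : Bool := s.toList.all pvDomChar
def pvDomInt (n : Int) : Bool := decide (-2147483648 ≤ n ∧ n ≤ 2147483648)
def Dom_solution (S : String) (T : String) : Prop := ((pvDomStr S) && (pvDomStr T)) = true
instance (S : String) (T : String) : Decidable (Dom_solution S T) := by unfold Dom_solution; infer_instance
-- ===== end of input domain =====

-- B replaces A's per-character scan of T by a dictionary of minimal cyclic distances precomputed
-- over the distinct character codes of S and T, making the per-character cost O(1) (objective: faster).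

-- the expression min(abs(t - c), 26 - abs(t - c)) that both Pythons compute
def cycDist (c : Int) (t : Int) : Int :=
  min (((t - c).natAbs : Int)) (26 - ((t - c).natAbs : Int))

-- ===== PORT A =====
def solution (S : String) (T : String) : Int :=
  -- data.append(ord(T[i]))
  let data : List Int := T.toList.foldl (fun acc c => acc ++ [((c.toNat : Nat) : Int)]) []
  -- outer loop over S; global_min = math.inf is modelled as none (reset after every character);
  -- 'gmin.getD 0' is reached only with T = "" (A adds float inf there), which Pre_ excludes
  S.toList.foldl (fun answer ch =>
    let gmin : Option Int :=
      data.foldl (fun g d =>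
        match g with
        | none => some (cycDist ((ch.toNat : Nat) : Int) d)       -- curr_min < inf
        | some gv =>
            if cycDist ((ch.toNat : Nat) : Int) d < gv then some (cycDist ((ch.toNat : Nat) : Int) d)
            else some gv) none
    answer + gmin.getD 0) 0

-- ===== PORT B =====
def solution_alt (S : String) (T : String) : Int :=
  let tvals : PySem.Set Int := PySem.Set.ofList (T.toList.map (fun c => ((c.toNat : Nat) : Int)))
  let svals : PySem.Set Int := PySem.Set.ofList (S.toList.map (fun c => ((c.toNat : Nat) : Int)))
  -- best = {c: min(...) for c in svals}; 'min' of a nonempty iterable is PySem.List.min?;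
  -- '.getD 0' is reached only with T = "" (Python min raises ValueError there), excluded by Pre_
  let best : PySem.Dict Int Int :=
    svals.foldl (fun d c =>
      d.insert c ((PySem.List.min? (tvals.map (fun t => cycDist c t)) (fun x => x)).getD 0))
      PySem.Dict.empty
  -- sum(best[c] for c in map(ord, S)); the key is always present, so getD 0 is exact
  S.toList.foldl (fun acc ch => acc + best.getD ((ch.toNat : Nat) : Int) 0) 0

-- ===== PRECONDITION & SPEC =====
-- Pre_ excludes S nonempty with T empty: there A returns the float inf (not an int) and B's min() raises ValueError.
def Pre_solution (S : String) (T : String) : Prop := S = "" ∨ T ≠ ""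
instance (S : String) (T : String) : Decidable (Pre_solution S T) := by unfold Pre_solution; infer_instance
def pvWitness_solution : String × String := ("ab", "xy")

def Spec_solution (S : String) (T : String) (out : Int) : Prop := out = solution_alt S T
instance (S : String) (T : String) (out : Int) : Decidable (Spec_solution S T out) := by unfold Spec_solution; infer_instance

-- ===== CLAIM (what is proved, stated in full; the proofs are below) =====
def Claim_equal_solution : Prop := ∀ (S : String) (T : String), Dom_solution S T → Pre_solution S T → Spec_solution S T (solution S T)

-- ===== LEMMAS AND PROOFS =====

-- A's inner loop, once the accumulator is finite, is a running minimum
lemma innerA_some (c : Int) (l : List Int) (a : Int) :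
    l.foldl (fun g d =>
      match g with
      | none => some (cycDist c d)
      | some gv => if cycDist c d < gv then some (cycDist c d) else some gv) (some a)
    = some ((l.map (cycDist c)).foldl min a) := by
  induction l generalizing a with
  | nil => rfl
  | cons d t ih =>
      simp only [List.foldl_cons, List.map_cons]
      have : (if cycDist c d < a then some (cycDist c d) else some a) = some (min a (cycDist c d)) := by
        rcases lt_or_ge (cycDist c d) a with h | h
        · rw [if_pos h, min_eq_right h.le]
        · rw [if_neg (not_lt.mpr h), min_eq_left h]
      rw [this, ih]

-- a running minimum only depends on the set of values seen
lemma foldl_min_eq_of_mem_iff (x1 x2 : Int) (t1 t2 : List Int)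
    (h : ∀ y : Int, (y = x1 ∨ y ∈ t1) ↔ (y = x2 ∨ y ∈ t2)) :
    t1.foldl min x1 = t2.foldl min x2 := by
  obtain ⟨h1a, h1b⟩ := PySem.List.foldl_min_le t1 x1
  obtain ⟨h2a, h2b⟩ := PySem.List.foldl_min_le t2 x2
  apply le_antisymm
  · rcases (h _).mpr (PySem.List.foldl_min_mem t2 x2) with hm | hm
    · exact hm ▸ h1a
    · exact h1b _ hm
  · rcases (h _).mp (PySem.List.foldl_min_mem t1 x1) with hm | hm
    · exact hm ▸ h2a
    · exact h2b _ hm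

-- a lookup in a dictionary built by inserting each distinct key once
lemma getD_foldl_insert_of_mem (L : List Int) (g : Int → Int) (hnd : L.Nodup) (c : Int) (hc : c ∈ L) :
    (L.foldl (fun d k => d.insert k (g k)) PySem.Dict.empty).getD c 0 = g c := by
  have hitems := PySem.Dict.items_foldl_insert_fresh (l := L) (k := fun a => a) (v := g)
      (d := PySem.Dict.empty) (by simp) (by simpa using hnd)
  have hemp : (PySem.Dict.empty : PySem.Dict Int Int).items = [] := rfl
  apply PySem.Dict.getD_of_mem_items
  · rw [hitems, hemp, List.nil_append]
    exact List.mem_map.mpr ⟨c, hc, rfl⟩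
  · show ((L.foldl (fun d k => d.insert k (g k)) PySem.Dict.empty).items.map (·.1)).Nodup
    rw [hitems, hemp, List.nil_append]
    simpa [Function.comp_def] using hnd

-- per character: A's inner scan of T equals B's precomputed minimum over the distinct codes of T
lemma perChar (c : Int) (data : List Int) (hd : data ≠ []) :
    (data.foldl (fun g d =>
      match g with
      | none => some (cycDist c d)
      | some gv => if cycDist c d < gv then some (cycDist c d) else some gv) none).getD 0
    = (PySem.List.min? ((PySem.Set.ofList data).map (fun t => cycDist c t)) (fun x => x)).getD 0 := by
  cases data with
  | nil => exact absurd rfl hd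
  | cons d0 rest =>
    rcases hset : (PySem.Set.ofList (d0 :: rest) : List Int) with _ | ⟨x2, t2⟩
    · exfalso
      have hm : d0 ∈ PySem.Set.ofList (d0 :: rest) :=
        (PySem.Set.mem_ofList _ _).mpr List.mem_cons_self
      rw [hset] at hm
      cases hm
    · rw [List.foldl_cons, innerA_some, List.map_cons, PySem.List.min?_id_cons]
      simp only [Option.getD_some]
      apply foldl_min_eq_of_mem_iff
      intro y
      have h2 : ∀ (w : Int) (l : List Int),
          (y = cycDist c w ∨ y ∈ l.map (cycDist c)) ↔ ∃ t ∈ w :: l, cycDist c t = y := by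
        intro w l
        constructor
        · rintro (rfl | hy)
          · exact ⟨w, List.mem_cons_self, rfl⟩
          · rcases List.mem_map.mp hy with ⟨t, ht, rfl⟩
            exact ⟨t, List.mem_cons_of_mem _ ht, rfl⟩
        · rintro ⟨t, ht, rfl⟩
          rcases List.mem_cons.mp ht with rfl | ht
          · exact Or.inl rfl
          · exact Or.inr (List.mem_map.mpr ⟨t, ht, rfl⟩)
      rw [h2 d0 rest, h2 x2 t2, ← hset]
      simp only [PySem.Set.mem_ofList]

-- ===== VERDICT (by name: the statement is the Claim_ definition above) =====
theorem solution_spec : Claim_equal_solution := by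
  unfold Claim_equal_solution Spec_solution
  intro S T _ hpre
  rcases hpre with hS | hT
  · subst hS; rfl
  · have hTl : T.toList ≠ [] := by
      intro h; exact hT (String.toList_eq_nil_iff.mp h)
    simp only [solution, solution_alt, PySem.List.foldl_append_singleton_eq_map, List.nil_append]
    apply PySem.List.foldl_congr_mem
    intro acc ch hch
    congr 1
    rw [perChar _ _ (by simpa using hTl)]
    rw [getD_foldl_insert_of_mem _ _ (PySem.Set.nodup_ofList _) _
      ((PySem.Set.mem_ofList _ _).mpr (List.mem_map.mpr ⟨ch, hch, rfl⟩))]
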